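-- pv_equiv track=rewrite | github.com/Hayden1629/bigdataproject | dashboard/charts.py | _overview_drug_bar_colors
-- ===== SOURCE A (Python) =====
-- def _overview_drug_bar_colors(n: int) -> list[str]:
--     """Top bar (largest value) is last row after ascending sort — highlight in red."""
--     out: list[str] = []
--     for i in range(n):
--         rank_from_top = n - 1 - i
--         if rank_from_top == 0:
--             out.append("#2F6FED")
--         elif rank_from_top <= 3:
--             out.append("#5A92F5")
--         else:
--             out.append("#A8C8FA")
--     return out
-- ===== SOURCE B (Python) =====
-- def _overview_drug_bar_colors(n: int) -> list[str]:
--     """Top bar (largest value) is last row after ascending sort — highlight in red."""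
--     light = max(0, n - 4)
--     medium = min(3, max(0, n - 1))
--     return ["#A8C8FA"] * light + ["#5A92F5"] * medium + (["#2F6FED"] if n > 0 else [])
-- ===== Notes on version B (the rewrite author's own statement) =====
-- stated objective: simpler
-- what changed: Replaces the per-index loop with rank branching by directly computing the three run lengths and concatenating homogeneous colour blocks (light/medium/red).
import Mathlib
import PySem

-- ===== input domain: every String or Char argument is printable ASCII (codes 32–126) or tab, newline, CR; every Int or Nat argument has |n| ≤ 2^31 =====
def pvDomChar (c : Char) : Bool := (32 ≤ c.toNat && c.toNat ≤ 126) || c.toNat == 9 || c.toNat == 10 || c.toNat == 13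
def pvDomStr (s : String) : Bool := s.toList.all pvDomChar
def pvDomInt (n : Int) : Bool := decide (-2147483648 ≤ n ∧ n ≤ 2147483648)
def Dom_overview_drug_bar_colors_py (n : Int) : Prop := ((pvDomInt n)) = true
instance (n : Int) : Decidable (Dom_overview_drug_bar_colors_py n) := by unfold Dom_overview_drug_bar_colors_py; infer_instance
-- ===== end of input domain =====

-- B replaces the per-index loop with three homogeneous colour blocks (simpler decomposition).

-- ===== PORT A =====
def overview_drug_bar_colors_py (n : Int) : List String :=
  (PySem.List.pyRange 0 n 1).foldl (fun out i =>
    -- rank_from_top = n - 1 - i (inlined)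
    if n - 1 - i = 0 then out ++ ["#2F6FED"]
    else if n - 1 - i ≤ 3 then out ++ ["#5A92F5"]
    else out ++ ["#A8C8FA"]) []

-- ===== PORT B =====
def overview_drug_bar_colors_py_alt (n : Int) : List String :=
  List.replicate (max 0 (n - 4)).toNat "#A8C8FA"
    ++ List.replicate (min 3 (max 0 (n - 1))).toNat "#5A92F5"
    ++ (if 0 < n then ["#2F6FED"] else [])

-- ===== PRECONDITION & SPEC =====
def Spec_overview_drug_bar_colors_py (n : Int) (out : List String) : Prop := out = overview_drug_bar_colors_py_alt n
instance (n : Int) (out : List String) : Decidable (Spec_overview_drug_bar_colors_py n out) := by unfold Spec_overview_drug_bar_colors_py; infer_instance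

-- ===== CLAIM (what is proved, stated in full; the proofs are below) =====
def Claim_equal_overview_drug_bar_colors_py : Prop := ∀ (n : Int), Dom_overview_drug_bar_colors_py n → Spec_overview_drug_bar_colors_py n (overview_drug_bar_colors_py n)

-- ===== LEMMAS AND PROOFS =====

/-- The colour A assigns to a rank-from-top value. -/
def pvColor (r : Int) : String :=
  if r = 0 then "#2F6FED" else if r ≤ 3 then "#5A92F5" else "#A8C8FA"

lemma pv_foldl_color (n : Int) : ∀ (l : List Int) (init : List String),
    l.foldl (fun out i =>
      if n - 1 - i = 0 then out ++ ["#2F6FED"]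
      else if n - 1 - i ≤ 3 then out ++ ["#5A92F5"]
      else out ++ ["#A8C8FA"]) init = init ++ l.map (fun i => pvColor (n - 1 - i))
  | [], init => by simp
  | x :: xs, init => by
      simp only [List.foldl_cons, List.map_cons, pv_foldl_color n xs, pvColor]
      split_ifs <;> simp

lemma pv_A_eq_map (n : Int) :
    overview_drug_bar_colors_py n = (PySem.List.pyRange 0 n 1).map (fun i => pvColor (n - 1 - i)) := by
  unfold overview_drug_bar_colors_py
  simpa using pv_foldl_color n (PySem.List.pyRange 0 n 1) []

lemma pv_alt_step (x : Int) (hx : 0 ≤ x) :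
    pvColor x :: overview_drug_bar_colors_py_alt x = overview_drug_bar_colors_py_alt (x + 1) := by
  by_cases hx4 : x ≤ 3
  · interval_cases x <;> decide
  · unfold overview_drug_bar_colors_py_alt pvColor
    rw [if_neg (by omega), if_neg (by omega),
      if_pos (by omega : (0 : Int) < x), if_pos (by omega : (0 : Int) < x + 1)]
    have e1 : (max 0 (x + 1 - 4)).toNat = (max 0 (x - 4)).toNat + 1 := by omega
    have e3 : (min 3 (max 0 (x - 1))).toNat = 3 := by omega
    have e4 : (min 3 (max 0 (x + 1 - 1))).toNat = 3 := by omega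
    rw [e1, e3, e4]
    simp [List.replicate_succ]

lemma pv_main (m : Nat) :
    (List.range m).map (fun k : Nat => pvColor ((m : Int) - 1 - (k : Int)))
      = overview_drug_bar_colors_py_alt (m : Int) := by
  induction m with
  | zero => decide
  | succ k ih =>
    rw [List.range_succ_eq_map]
    simp only [List.map_cons, List.map_map]
    have hf : ((fun j : Nat => pvColor (((k + 1 : Nat) : Int) - 1 - (j : Int))) ∘ Nat.succ)
        = fun j : Nat => pvColor ((k : Int) - 1 - (j : Int)) := by
      funext j
      simp only [Function.comp_apply]
      congr 1
      push_cast
      ring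
    rw [hf, ih]
    have hc : ((k + 1 : Nat) : Int) - 1 - ((0 : Nat) : Int) = (k : Int) := by push_cast; ring
    rw [hc]
    have := pv_alt_step (k : Int) (by positivity)
    push_cast at this ⊢
    exact this

-- ===== VERDICT (by name: the statement is the Claim_ definition above) =====
theorem overview_drug_bar_colors_py_spec : Claim_equal_overview_drug_bar_colors_py := by
  intro n _
  unfold Spec_overview_drug_bar_colors_py
  rw [pv_A_eq_map]
  by_cases hn : n ≤ 0
  · rw [PySem.List.pyRange_one_eq_nil hn]
    have h1 : (max 0 (n - 4)).toNat = 0 := by omega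
    have h2 : (min 3 (max 0 (n - 1))).toNat = 0 := by omega
    simp [overview_drug_bar_colors_py_alt, h1, h2, hn]
  · have hn' : n = (n.toNat : Int) := by omega
    rw [hn', PySem.List.pyRange_one, List.map_map]
    have hr : (((n.toNat : Int)) - 0).toNat = n.toNat := by omega
    rw [hr]
    have hf : ((fun i => pvColor ((n.toNat : Int) - 1 - i)) ∘ fun k : Nat => (0 : Int) + (k : Int))
        = fun k : Nat => pvColor ((n.toNat : Int) - 1 - (k : Int)) := by
      funext j; simp
    rw [hf]
    exact pv_main n.toNat
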